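-- pv_equiv track=rewrite | github.com/AzeemWaqar-R3BIRTH/SecureTrainer | app/models/challenge_model.py | generic_answer_validation
-- ===== SOURCE A (Python) =====
-- def get_common_variations(expected_solutions):
--     """Generate common variations of expected solutions."""
--     variations = []
--
--     for solution in expected_solutions:
--         # Add variations with different capitalization
--         variations.append(solution.upper())
--         variations.append(solution.capitalize())
--
--         # Add variations with different spacing
--         variations.append(solution.replace(' ', '_'))
--         variations.append(solution.replace(' ', '-'))
--
--         # Add variations with different punctuation
--         variations.append(solution + '.')
--         variations.append(solution + '?')
--
--         # Add variations with synonyms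
--         synonyms = get_synonyms(solution)
--         variations.extend(synonyms)
--
--     return variations
--
-- def get_synonyms(word):
--     """Get synonyms for a word (simplified version)."""
--     synonym_map = {
--         'union': ['UNION', 'combine', 'merge', 'join'],
--         'select': ['SELECT', 'retrieve', 'fetch', 'get'],
--         'users': ['users', 'user table', 'user data', 'accounts'],
--         'passwords': ['passwords', 'credentials', 'passcodes', 'secrets'],
--         'extract': ['extract', 'obtain', 'retrieve', 'access', 'pull'],
--         'information': ['information', 'data', 'details', 'content'],
--         'bypass': ['bypass', 'circumvent', 'avoid', 'skip', 'evade'],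
--         'attack': ['attack', 'exploit', 'vulnerability', 'breach', 'invasion'],
--         'payload': ['payload', 'input', 'code', 'script', 'command'],
--         'inject': ['inject', 'insert', 'embed', 'introduce', 'place'],
--         'script': ['script', 'code', 'program', 'function', 'routine'],
--         'execute': ['execute', 'run', 'perform', 'carry out', 'implement'],
--         'javascript': ['javascript', 'JS', 'JavaScript', 'js', 'client-side script'],
--         'alert': ['alert', 'popup', 'notification', 'message', 'dialog'],
--         'command': ['command', 'instruction', 'directive', 'order', 'request'],
--         'shell': ['shell', 'terminal', 'console', 'command line', 'CLI'],
--         'reverse': ['reverse', 'backdoor', 'connection', 'tunnel', 'link'],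
--         'token': ['token', 'key', 'code', 'identifier', 'credential'],
--         'session': ['session', 'connection', 'login', 'instance', 'interaction'],
--         'fixation': ['fixation', 'binding', 'attachment', 'assignment', 'setup'],
--         'hijack': ['hijack', 'steal', 'takeover', 'capture', 'intercept'],
--         'CSRF': ['CSRF', 'Cross-Site Request Forgery', 'cross-site request forgery', 'forged request'],
--         'form': ['form', 'input', 'interface', 'field', 'entry'],
--         'hidden': ['hidden', 'invisible', 'concealed', 'secret', 'private'],
--         'submit': ['submit', 'send', 'transmit', 'post', 'dispatch'],
--         'fetch': ['fetch', 'request', 'retrieve', 'obtain', 'get'],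
--         'XMLHttpRequest': ['XMLHttpRequest', 'XHR', 'ajax', 'asynchronous request', 'HTTP request']
--     }
--
--     return synonym_map.get(word.lower(), [])
--
-- def generic_answer_validation(normalized_answer, expected_solutions):
--     """Generic validation for answers that don't fit specific patterns."""
--     # Check if any expected solution is present in the answer
--     for expected in expected_solutions:
--         if expected.lower() in normalized_answer:
--             return True, "Correct solution!"
--
--     # Check for common variations of the expected solutions
--     variations = get_common_variations(expected_solutions)
--
--     for variation in variations:
--         if variation.lower() in normalized_answer:
--             return True, "Correct solution!"
--
--     return False, "Solution not recognized. Check your answer."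
-- ===== SOURCE B (Python) =====
-- # Same validation, different shape: the synonym data lives in one compact text
-- # table parsed once into a dict, and matching is a single early-return scan per
-- # solution over a short candidate list.  Under lowercase substring matching,
-- # A's upper()/capitalize() variants and the trailing '.'/'?' variants can never
-- # match unless the solution itself already does, so they are dropped.
--
-- _SYNONYM_ROWS = [
--     ('union', 'UNION,combine,merge,join'),
--     ('select', 'SELECT,retrieve,fetch,get'),
--     ('users', 'users,user table,user data,accounts'),
--     ('passwords', 'passwords,credentials,passcodes,secrets'),
--     ('extract', 'extract,obtain,retrieve,access,pull'),
--     ('information', 'information,data,details,content'),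
--     ('bypass', 'bypass,circumvent,avoid,skip,evade'),
--     ('attack', 'attack,exploit,vulnerability,breach,invasion'),
--     ('payload', 'payload,input,code,script,command'),
--     ('inject', 'inject,insert,embed,introduce,place'),
--     ('script', 'script,code,program,function,routine'),
--     ('execute', 'execute,run,perform,carry out,implement'),
--     ('javascript', 'javascript,JS,JavaScript,js,client-side script'),
--     ('alert', 'alert,popup,notification,message,dialog'),
--     ('command', 'command,instruction,directive,order,request'),
--     ('shell', 'shell,terminal,console,command line,CLI'),
--     ('reverse', 'reverse,backdoor,connection,tunnel,link'),
--     ('token', 'token,key,code,identifier,credential'),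
--     ('session', 'session,connection,login,instance,interaction'),
--     ('fixation', 'fixation,binding,attachment,assignment,setup'),
--     ('hijack', 'hijack,steal,takeover,capture,intercept'),
--     ('CSRF', 'CSRF,Cross-Site Request Forgery,cross-site request forgery,forged request'),
--     ('form', 'form,input,interface,field,entry'),
--     ('hidden', 'hidden,invisible,concealed,secret,private'),
--     ('submit', 'submit,send,transmit,post,dispatch'),
--     ('fetch', 'fetch,request,retrieve,obtain,get'),
--     ('XMLHttpRequest', 'XMLHttpRequest,XHR,ajax,asynchronous request,HTTP request'),
-- ]
--
-- # parsed once: comma-packed synonym cells expanded into lists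
-- _SYNONYMS = {key: cell.split(',') for key, cell in _SYNONYM_ROWS}
--
--
-- def _matches(normalized_answer, candidates):
--     for c in candidates:
--         if c.lower() in normalized_answer:
--             return True
--     return False
--
--
-- def generic_answer_validation(normalized_answer, expected_solutions):
--     """Generic validation for answers that don't fit specific patterns."""
--     for s in expected_solutions:
--         candidates = [s, s.replace(' ', '_'), s.replace(' ', '-')]
--         candidates += _SYNONYMS.get(s.lower(), [])
--         if _matches(normalized_answer, candidates):
--             return True, "Correct solution!"
--     return False, "Solution not recognized. Check your answer."
-- ===== Notes on version B (the rewrite author's own statement) =====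
-- stated objective: faster
-- what changed: B stores the synonym data as a compact row list of comma-packed cells parsed once into a dict, drops the upper()/capitalize() and trailing '.'/'?' variants (redundant under lowercase substring matching), and replaces A's two staged scans plus per-call variation-list construction with a single early-return scan per solution over a short candidate list.
import Mathlib
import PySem

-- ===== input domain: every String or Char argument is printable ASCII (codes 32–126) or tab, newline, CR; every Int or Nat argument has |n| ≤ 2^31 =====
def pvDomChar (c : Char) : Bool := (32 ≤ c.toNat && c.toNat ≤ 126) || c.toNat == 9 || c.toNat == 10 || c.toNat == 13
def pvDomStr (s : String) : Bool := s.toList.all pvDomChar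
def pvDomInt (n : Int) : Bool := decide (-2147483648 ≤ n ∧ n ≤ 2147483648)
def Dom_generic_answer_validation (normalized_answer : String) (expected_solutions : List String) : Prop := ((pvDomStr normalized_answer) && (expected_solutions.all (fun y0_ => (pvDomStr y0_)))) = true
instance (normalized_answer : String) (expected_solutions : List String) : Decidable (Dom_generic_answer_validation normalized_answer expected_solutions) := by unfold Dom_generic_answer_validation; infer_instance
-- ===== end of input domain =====

-- ===== PORT A =====
-- the synonym_map dict literal (all keys distinct, so insertion order is the literal order)
def pvSynonymMap : PySem.Dict String (List String) := PySem.Dict.mk [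
  ("union", ["UNION", "combine", "merge", "join"]),
  ("select", ["SELECT", "retrieve", "fetch", "get"]),
  ("users", ["users", "user table", "user data", "accounts"]),
  ("passwords", ["passwords", "credentials", "passcodes", "secrets"]),
  ("extract", ["extract", "obtain", "retrieve", "access", "pull"]),
  ("information", ["information", "data", "details", "content"]),
  ("bypass", ["bypass", "circumvent", "avoid", "skip", "evade"]),
  ("attack", ["attack", "exploit", "vulnerability", "breach", "invasion"]),
  ("payload", ["payload", "input", "code", "script", "command"]),
  ("inject", ["inject", "insert", "embed", "introduce", "place"]),
  ("script", ["script", "code", "program", "function", "routine"]),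
  ("execute", ["execute", "run", "perform", "carry out", "implement"]),
  ("javascript", ["javascript", "JS", "JavaScript", "js", "client-side script"]),
  ("alert", ["alert", "popup", "notification", "message", "dialog"]),
  ("command", ["command", "instruction", "directive", "order", "request"]),
  ("shell", ["shell", "terminal", "console", "command line", "CLI"]),
  ("reverse", ["reverse", "backdoor", "connection", "tunnel", "link"]),
  ("token", ["token", "key", "code", "identifier", "credential"]),
  ("session", ["session", "connection", "login", "instance", "interaction"]),
  ("fixation", ["fixation", "binding", "attachment", "assignment", "setup"]),
  ("hijack", ["hijack", "steal", "takeover", "capture", "intercept"]),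
  ("CSRF", ["CSRF", "Cross-Site Request Forgery", "cross-site request forgery", "forged request"]),
  ("form", ["form", "input", "interface", "field", "entry"]),
  ("hidden", ["hidden", "invisible", "concealed", "secret", "private"]),
  ("submit", ["submit", "send", "transmit", "post", "dispatch"]),
  ("fetch", ["fetch", "request", "retrieve", "obtain", "get"]),
  ("XMLHttpRequest", ["XMLHttpRequest", "XHR", "ajax", "asynchronous request", "HTTP request"])]

-- get_synonyms, on List Char (strings are handled on the .toList side throughout)
def get_synonyms (word : List Char) : List (List Char) :=
  (pvSynonymMap.getD (String.ofList (PySem.Chars.lower word)) []).map String.toList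

-- hand port of str.capitalize(): first char uppercased (= titlecased on ASCII), rest lowercased; exact on the ASCII domain
def pyCapitalize (s : List Char) : List Char :=
  match s with
  | [] => []
  | c :: rest => PySem.Chars.upperChar c :: rest.map PySem.Chars.lowerChar

def get_common_variations (expected_solutions : List (List Char)) : List (List Char) :=
  expected_solutions.foldl (fun variations solution =>
    ((((((variations
      ++ [PySem.Chars.upper solution])
      ++ [pyCapitalize solution])
      ++ [PySem.Chars.replace solution [' '] ['_']])
      ++ [PySem.Chars.replace solution [' '] ['-']])
      ++ [solution ++ ['.']])
      ++ [solution ++ ['?']])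
      ++ get_synonyms solution) []

def generic_answer_validation (normalized_answer : String) (expected_solutions : List String) : Bool × String :=
  if expected_solutions.any (fun expected =>
      PySem.Chars.isIn (PySem.Chars.lower expected.toList) normalized_answer.toList) then
    (true, "Correct solution!")
  else
    let variations := get_common_variations (expected_solutions.map String.toList)
    if variations.any (fun variation =>
        PySem.Chars.isIn (PySem.Chars.lower variation) normalized_answer.toList) then
      (true, "Correct solution!")
    else
      (false, "Solution not recognized. Check your answer.")

-- ===== PORT B =====
-- B (Source B): the synonym data is a row list of comma-packed cells, parsed once into
-- a dict; matching is a single early-return scan per solution over a short candidate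
-- list (upper/capitalize and trailing '.'/'?' variants are dropped as redundant under
-- lowercase substring matching).
def pvSynonymRows : List (String × String) := [
  ("union", "UNION,combine,merge,join"),
  ("select", "SELECT,retrieve,fetch,get"),
  ("users", "users,user table,user data,accounts"),
  ("passwords", "passwords,credentials,passcodes,secrets"),
  ("extract", "extract,obtain,retrieve,access,pull"),
  ("information", "information,data,details,content"),
  ("bypass", "bypass,circumvent,avoid,skip,evade"),
  ("attack", "attack,exploit,vulnerability,breach,invasion"),
  ("payload", "payload,input,code,script,command"),
  ("inject", "inject,insert,embed,introduce,place"),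
  ("script", "script,code,program,function,routine"),
  ("execute", "execute,run,perform,carry out,implement"),
  ("javascript", "javascript,JS,JavaScript,js,client-side script"),
  ("alert", "alert,popup,notification,message,dialog"),
  ("command", "command,instruction,directive,order,request"),
  ("shell", "shell,terminal,console,command line,CLI"),
  ("reverse", "reverse,backdoor,connection,tunnel,link"),
  ("token", "token,key,code,identifier,credential"),
  ("session", "session,connection,login,instance,interaction"),
  ("fixation", "fixation,binding,attachment,assignment,setup"),
  ("hijack", "hijack,steal,takeover,capture,intercept"),
  ("CSRF", "CSRF,Cross-Site Request Forgery,cross-site request forgery,forged request"),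
  ("form", "form,input,interface,field,entry"),
  ("hidden", "hidden,invisible,concealed,secret,private"),
  ("submit", "submit,send,transmit,post,dispatch"),
  ("fetch", "fetch,request,retrieve,obtain,get"),
  ("XMLHttpRequest", "XMLHttpRequest,XHR,ajax,asynchronous request,HTTP request")]

-- the dict comprehension: each comma-packed cell split into its synonym list
def pvParsedSynonyms : PySem.Dict String (List String) :=
  pvSynonymRows.foldl
    (fun table row =>
      table.insert row.1 ((PySem.Chars.splitOn row.2.toList [',']).map String.ofList))
    (PySem.Dict.mk [])

-- _matches: early-return scan over the candidate list
def pyMatches (answer : List Char) : List (List Char) → Bool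
  | [] => false
  | c :: rest =>
      if PySem.Chars.isIn (PySem.Chars.lower c) answer then true else pyMatches answer rest

-- the main loop over expected_solutions, early-returning on the first matching solution
def pyScanSolutions (answer : List Char) : List String → Bool
  | [] => false
  | s :: rest =>
      let candidates := [s.toList,
        PySem.Chars.replace s.toList [' '] ['_'],
        PySem.Chars.replace s.toList [' '] ['-']]
        ++ (pvParsedSynonyms.getD (String.ofList (PySem.Chars.lower s.toList)) []).map String.toList
      if pyMatches answer candidates then true else pyScanSolutions answer rest

def generic_answer_validation_alt (normalized_answer : String) (expected_solutions : List String) : Bool × String :=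
  if pyScanSolutions normalized_answer.toList expected_solutions then
    (true, "Correct solution!")
  else
    (false, "Solution not recognized. Check your answer.")

-- ===== PRECONDITION & SPEC =====
def Spec_generic_answer_validation (normalized_answer : String) (expected_solutions : List String) (out : Bool × String) : Prop := out = generic_answer_validation_alt normalized_answer expected_solutions
instance (normalized_answer : String) (expected_solutions : List String) (out : Bool × String) : Decidable (Spec_generic_answer_validation normalized_answer expected_solutions out) := by unfold Spec_generic_answer_validation; infer_instance

-- ===== CLAIM (what is proved, stated in full; the proofs are below) =====
def Claim_equal_generic_answer_validation : Prop := ∀ (normalized_answer : String) (expected_solutions : List String), Dom_generic_answer_validation normalized_answer expected_solutions → Spec_generic_answer_validation normalized_answer expected_solutions (generic_answer_validation normalized_answer expected_solutions)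

-- ===== LEMMAS AND PROOFS =====

-- B's parsed table is exactly A's dict literal (both are closed terms)
set_option maxRecDepth 16384 in
set_option maxHeartbeats 1000000 in
theorem parsed_table_eq : pvParsedSynonyms = pvSynonymMap := by decide

theorem lowerChar_upperChar (c : Char) :
    PySem.Chars.lowerChar (PySem.Chars.upperChar c) = PySem.Chars.lowerChar c := by
  unfold PySem.Chars.lowerChar PySem.Chars.upperChar PySem.Chars.isupper PySem.Chars.islower
  simp only [Bool.and_eq_true, decide_eq_true_eq]
  by_cases h : ('a' ≤ c ∧ c ≤ 'z')
  · have hn1 : 97 ≤ c.toNat := h.1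
    have hn2 : c.toNat ≤ 122 := h.2
    have hv : (c.toNat - 32).isValidChar := by unfold Nat.isValidChar; omega
    have ht : (Char.ofNat (c.toNat - 32)).toNat = c.toNat - 32 := by
      rw [Char.toNat_ofNat, if_pos hv]
    have hA : 'A' ≤ Char.ofNat (c.toNat - 32) := by
      show (65:Nat) ≤ (Char.ofNat (c.toNat - 32)).toNat; omega
    have hZ : Char.ofNat (c.toNat - 32) ≤ 'Z' := by
      show (Char.ofNat (c.toNat - 32)).toNat ≤ 90; omega
    rw [if_pos h, if_pos ⟨hA, hZ⟩, ht,
        if_neg (by rintro ⟨h5, h6⟩; have : c.toNat ≤ 90 := h6; omega)]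
    have h32 : c.toNat - 32 + 32 = c.toNat := by omega
    rw [h32, Char.ofNat_toNat]
  · rw [if_neg h]

theorem lowerChar_lowerChar (c : Char) :
    PySem.Chars.lowerChar (PySem.Chars.lowerChar c) = PySem.Chars.lowerChar c := by
  unfold PySem.Chars.lowerChar PySem.Chars.isupper
  simp only [Bool.and_eq_true, decide_eq_true_eq]
  by_cases h : ('A' ≤ c ∧ c ≤ 'Z')
  · have hn1 : 65 ≤ c.toNat := h.1
    have hn2 : c.toNat ≤ 90 := h.2
    have hv : (c.toNat + 32).isValidChar := by unfold Nat.isValidChar; omega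
    have ht : (Char.ofNat (c.toNat + 32)).toNat = c.toNat + 32 := by
      rw [Char.toNat_ofNat, if_pos hv]
    rw [if_pos h,
        if_neg (by rintro ⟨h5, h6⟩
                   have h7 : (Char.ofNat (c.toNat + 32)).toNat ≤ 90 := h6
                   omega)]
  · rw [if_neg h, if_neg h]

theorem lower_upper (s : List Char) :
    PySem.Chars.lower (PySem.Chars.upper s) = PySem.Chars.lower s := by
  simp [PySem.Chars.lower, PySem.Chars.upper, lowerChar_upperChar]

theorem lower_capitalize (s : List Char) :
    PySem.Chars.lower (pyCapitalize s) = PySem.Chars.lower s := by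
  cases s with
  | nil => rfl
  | cons c rest =>
    simp [pyCapitalize, PySem.Chars.lower, lowerChar_upperChar, lowerChar_lowerChar]

theorem lower_append (s t : List Char) :
    PySem.Chars.lower (s ++ t) = PySem.Chars.lower s ++ PySem.Chars.lower t := by
  simp [PySem.Chars.lower]

-- a match of (x ++ y) inside a is also a match of x
theorem isIn_append_right (x y a : List Char) (h : PySem.Chars.isIn (x ++ y) a = true) :
    PySem.Chars.isIn x a = true := by
  rw [PySem.Chars.isIn_iff_infix] at h ⊢
  exact ((List.prefix_append x y).isInfix).trans h

theorem any_or_eq_any {α : Type} (l : List α) (f g : α → Bool) :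
    (l.any f || l.any g) = l.any (fun x => f x || g x) := by
  induction l with
  | nil => simp
  | cons a t ih =>
    simp only [List.any_cons, ← ih]
    cases f a <;> cases g a <;> simp

theorem get_common_variations_eq_flatMap (l : List (List Char)) :
    get_common_variations l =
      l.flatMap (fun s =>
        [PySem.Chars.upper s, pyCapitalize s,
         PySem.Chars.replace s [' '] ['_'], PySem.Chars.replace s [' '] ['-'],
         s ++ ['.'], s ++ ['?']] ++ get_synonyms s) := by
  unfold get_common_variations
  simp only [List.append_assoc, List.cons_append]
  rw [PySem.List.foldl_append_eq_flatMap]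
  simp [List.flatMap]

-- B's per-solution candidate list (proof-side abbreviation, phrased over A's table)
def pvCands (s : List Char) : List (List Char) :=
  [s, PySem.Chars.replace s [' '] ['_'], PySem.Chars.replace s [' '] ['-']]
  ++ get_synonyms s

theorem pyMatches_eq_any (a : List Char) (l : List (List Char)) :
    pyMatches a l = l.any (fun c => PySem.Chars.isIn (PySem.Chars.lower c) a) := by
  induction l with
  | nil => rfl
  | cons c rest ih =>
    simp only [pyMatches, List.any_cons, ih]
    by_cases h : PySem.Chars.isIn (PySem.Chars.lower c) a = true <;> simp [h]

theorem pyScanSolutions_eq_any (a : List Char) (es : List String) :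
    pyScanSolutions a es =
      es.any (fun s => (pvCands s.toList).any
        (fun c => PySem.Chars.isIn (PySem.Chars.lower c) a)) := by
  induction es with
  | nil => rfl
  | cons s rest ih =>
    simp only [pyScanSolutions, parsed_table_eq, List.any_cons, ih, pyMatches_eq_any]
    have he : ([s.toList, PySem.Chars.replace s.toList [' '] ['_'],
        PySem.Chars.replace s.toList [' '] ['-']]
        ++ (pvSynonymMap.getD (String.ofList (PySem.Chars.lower s.toList)) []).map String.toList)
        = pvCands s.toList := rfl
    rw [he]
    by_cases h : (pvCands s.toList).any
        (fun c => PySem.Chars.isIn (PySem.Chars.lower c) a) = true <;> simp [h]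

-- per-solution: A's eight checks collapse to B's candidate list
theorem per_solution (s a : List Char) :
    (PySem.Chars.isIn (PySem.Chars.lower s) a ||
      ([PySem.Chars.upper s, pyCapitalize s,
        PySem.Chars.replace s [' '] ['_'], PySem.Chars.replace s [' '] ['-'],
        s ++ ['.'], s ++ ['?']] ++ get_synonyms s).any
        (fun v => PySem.Chars.isIn (PySem.Chars.lower v) a)) =
    (pvCands s).any (fun c => PySem.Chars.isIn (PySem.Chars.lower c) a) := by
  simp only [pvCands, List.any_append, List.any_cons, List.any_nil,
    lower_upper, lower_capitalize, lower_append]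
  by_cases h : PySem.Chars.isIn (PySem.Chars.lower s) a = true
  · simp [h]
  · have hb : PySem.Chars.isIn (PySem.Chars.lower s) a = false := by
      cases hx : PySem.Chars.isIn (PySem.Chars.lower s) a
      · rfl
      · exact absurd hx h
    have hd1 : PySem.Chars.isIn (PySem.Chars.lower s ++ PySem.Chars.lower ['.']) a = false := by
      cases hx : PySem.Chars.isIn (PySem.Chars.lower s ++ PySem.Chars.lower ['.']) a
      · rfl
      · exact absurd (isIn_append_right _ _ _ hx) h
    have hd2 : PySem.Chars.isIn (PySem.Chars.lower s ++ PySem.Chars.lower ['?']) a = false := by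
      cases hx : PySem.Chars.isIn (PySem.Chars.lower s ++ PySem.Chars.lower ['?']) a
      · rfl
      · exact absurd (isIn_append_right _ _ _ hx) h
    simp [hb, hd1, hd2]

theorem conds_eq (normalized_answer : String) (expected_solutions : List String) :
    (expected_solutions.any (fun expected =>
        PySem.Chars.isIn (PySem.Chars.lower expected.toList) normalized_answer.toList) ||
      (get_common_variations (expected_solutions.map String.toList)).any (fun v =>
        PySem.Chars.isIn (PySem.Chars.lower v) normalized_answer.toList)) =
    pyScanSolutions normalized_answer.toList expected_solutions := by
  rw [pyScanSolutions_eq_any, get_common_variations_eq_flatMap,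
    List.any_flatMap, List.any_map, any_or_eq_any]
  exact PySem.List.any_congr_mem
    (fun x _ => per_solution x.toList normalized_answer.toList)

-- ===== VERDICT (by name: the statement is the Claim_ definition above) =====
theorem generic_answer_validation_spec : Claim_equal_generic_answer_validation := by
  intro normalized_answer expected_solutions _
  show generic_answer_validation normalized_answer expected_solutions =
    generic_answer_validation_alt normalized_answer expected_solutions
  unfold generic_answer_validation generic_answer_validation_alt
  have h := conds_eq normalized_answer expected_solutions
  rw [← h]
  cases h1 : expected_solutions.any (fun expected =>
      PySem.Chars.isIn (PySem.Chars.lower expected.toList) normalized_answer.toList)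
  · simp [h1]
  · simp
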